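-- pv_equiv track=rewrite | github.com/LuisMAC2022/COC | backend/export/export_clan_snapshot.py | compute_th_distribution
-- ===== SOURCE A (Python) =====
-- def compute_th_distribution(profiles):
--     buckets = {}
--     for profile in profiles:
--         th = profile.get("th")
--         if th is None:
--             continue
--         buckets[th] = buckets.get(th, 0) + 1
--     distribution = [
--         {"th": th, "count": count} for th, count in sorted(buckets.items(), reverse=True)
--     ]
--     return distribution
-- ===== SOURCE B (Python) =====
-- def compute_th_distribution(profiles):
--     ths = sorted((p["th"] for p in profiles if p.get("th") is not None), reverse=True)
--     out = []
--     while ths: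
--         v = ths[0]
--         run = 1
--         while run < len(ths) and ths[run] == v:
--             run += 1
--         out.append({"th": v, "count": run})
--         ths = ths[run:]
--     return out
-- ===== Notes on version B (the rewrite author's own statement) =====
-- stated objective: alternative
-- what changed: Replaces the dict-based counting pass plus key-sort with collecting the th values, sorting them descending once, and emitting one entry per run of equal values in a single grouping scan.
import Mathlib
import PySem

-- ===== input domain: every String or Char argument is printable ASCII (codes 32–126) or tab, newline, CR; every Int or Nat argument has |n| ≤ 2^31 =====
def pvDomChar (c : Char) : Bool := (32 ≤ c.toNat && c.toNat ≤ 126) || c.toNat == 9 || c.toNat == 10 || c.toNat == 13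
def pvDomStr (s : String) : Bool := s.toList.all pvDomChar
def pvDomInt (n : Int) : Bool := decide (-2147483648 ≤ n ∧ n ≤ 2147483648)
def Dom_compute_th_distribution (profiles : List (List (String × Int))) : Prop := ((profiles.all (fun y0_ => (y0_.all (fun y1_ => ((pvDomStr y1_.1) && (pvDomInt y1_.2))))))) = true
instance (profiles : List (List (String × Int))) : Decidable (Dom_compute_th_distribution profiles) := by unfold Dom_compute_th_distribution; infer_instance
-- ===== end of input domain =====

-- B replaces A's dict-counting pass plus key-sort by sorting the collected th values
-- descending once and grouping equal-value runs in a single scan (objective: alternative).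

-- ===== PORT A =====
def compute_th_distribution (profiles : List (List (String × Int))) : List (List (String × Int)) :=
  let buckets : PySem.Dict Int Int := profiles.foldl (fun b profile =>
      match (PySem.Dict.mk profile).get? "th" with
      | none => b
      | some th => b.insert th (b.getD th 0 + 1)) PySem.Dict.empty
  (PySem.List.sorted2 buckets.items (fun p => p.1) (fun p => p.2) true).map
    (fun p => [("th", p.1), ("count", p.2)])

-- ===== PORT B =====
-- B's outer 'while ths:' loop, one iteration per run: 'run' ends at 1 + (leading elements of the
-- suffix equal to v), and the loop continues on ths[run:]
def pvGroup : List Int → List (List (String × Int))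
  | [] => []
  | v :: rest =>
    let run := rest.takeWhile (fun x => x == v)
    [("th", v), ("count", ((run.length : Int) + 1))] :: pvGroup (rest.drop run.length)
  termination_by l => l.length
  decreasing_by simp

def compute_th_distribution_alt (profiles : List (List (String × Int))) : List (List (String × Int)) :=
  pvGroup (PySem.List.sorted (profiles.filterMap (fun p => (PySem.Dict.mk p).get? "th")) (fun x => x) true)

-- ===== PRECONDITION & SPEC =====
def Spec_compute_th_distribution (profiles : List (List (String × Int))) (out : List (List (String × Int))) : Prop := out = compute_th_distribution_alt profiles
instance (profiles : List (List (String × Int))) (out : List (List (String × Int))) : Decidable (Spec_compute_th_distribution profiles out) := by unfold Spec_compute_th_distribution; infer_instance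

-- ===== CLAIM (what is proved, stated in full; the proofs are below) =====
def Claim_equal_compute_th_distribution : Prop := ∀ (profiles : List (List (String × Int))), Dom_compute_th_distribution profiles → Spec_compute_th_distribution profiles (compute_th_distribution profiles)

-- ===== LEMMAS AND PROOFS =====

-- A's loop over profiles, skipping missing "th", is the counter loop over the collected values
lemma pvFoldl_filterMap (l : List (List (String × Int))) (d : PySem.Dict Int Int) :
    l.foldl (fun b profile =>
      match (PySem.Dict.mk profile).get? "th" with
      | none => b
      | some th => b.insert th (b.getD th 0 + 1)) d
    = (l.filterMap (fun p => (PySem.Dict.mk p).get? "th")).foldl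
        (fun b x => b.insert x (b.getD x 0 + 1)) d := by
  induction l generalizing d with
  | nil => rfl
  | cons p t ih =>
    cases h : (PySem.Dict.mk p).get? "th" <;> simp [h, ih]

-- the 'before' test sorted2 uses with reverse=True never puts a smaller first key in front
lemma pvBefore_le {a b : Int × Int}
    (h : (decide (b.1 < a.1) || (!decide (a.1 < b.1) && decide (b.2 < a.2))) = true) :
    b.1 ≤ a.1 := by
  rcases Bool.or_eq_true_iff.1 h with h1 | h2
  · exact le_of_lt (by simpa using h1)
  · simp only [Bool.and_eq_true, Bool.not_eq_true'] at h2
    simpa using le_of_not_gt (by simpa using h2.1)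

lemma pvBefore_ge {a b : Int × Int}
    (h : (decide (b.1 < a.1) || (!decide (a.1 < b.1) && decide (b.2 < a.2))) = false) :
    a.1 ≤ b.1 := by
  simp only [Bool.or_eq_false_iff] at h
  exact le_of_not_gt (by simpa using h.1)

lemma pvInsertBy_pairwise (x : Int × Int) (ys : List (Int × Int))
    (h : ys.Pairwise (fun a b => b.1 ≤ a.1)) :
    (PySem.List.insertBy (fun a b => decide (b.1 < a.1) || (!decide (a.1 < b.1) && decide (b.2 < a.2))) x ys).Pairwise
      (fun a b => b.1 ≤ a.1) := by
  induction ys with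
  | nil => simp [PySem.List.insertBy]
  | cons y t ih =>
    rcases List.pairwise_cons.1 h with ⟨hy, ht⟩
    by_cases hb : (decide (y.1 < x.1) || (!decide (x.1 < y.1) && decide (y.2 < x.2))) = true
    · rw [PySem.List.insertBy, if_pos hb]
      refine List.pairwise_cons.2 ⟨?_, h⟩
      intro z hz
      rcases List.mem_cons.1 hz with rfl | hz
      · exact pvBefore_le hb
      · exact le_trans (hy z hz) (pvBefore_le hb)
    · rw [PySem.List.insertBy, if_neg hb]
      refine List.pairwise_cons.2 ⟨?_, ih ht⟩
      intro z hz
      rcases (PySem.List.insertBy_mem_iff _ _ _ _).1 hz with rfl | hz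
      · exact pvBefore_ge (Bool.not_eq_true _ ▸ (by simpa using hb))
      · exact hy z hz

lemma pvFoldl_insertBy_pairwise (xs : List (Int × Int)) (acc : List (Int × Int))
    (h : acc.Pairwise (fun a b => b.1 ≤ a.1)) :
    (xs.foldl (fun acc x =>
        PySem.List.insertBy (fun a b => decide (b.1 < a.1) || (!decide (a.1 < b.1) && decide (b.2 < a.2))) x acc) acc).Pairwise
      (fun a b => b.1 ≤ a.1) := by
  induction xs generalizing acc with
  | nil => simpa using h
  | cons x t ih => exact ih _ (pvInsertBy_pairwise x acc h)

-- sorted(items, reverse=True) with strictly-decreasing-key witness list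
lemma pvSorted2_rev_eq (xs ys : List (Int × Int)) (hperm : ys.Perm xs)
    (hp : ys.Pairwise (fun a b => b.1 < a.1)) :
    PySem.List.sorted2 xs (fun p => p.1) (fun p => p.2) true = ys := by
  have hpw : (PySem.List.sorted2 xs (fun p => p.1) (fun p => p.2) true).Pairwise
      (fun a b : Int × Int => b.1 ≤ a.1) := by
    unfold PySem.List.sorted2
    exact pvFoldl_insertBy_pairwise xs [] (List.Pairwise.nil)
  exact PySem.List.eq_of_perm_of_pairwise_ge_of_pairwise_gt (fun p => p.1)
    ((PySem.List.sorted2_perm xs _ _ true).trans hperm.symm) hpw hp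

-- ofList is a sublist (first occurrences in order)
lemma pvOfList_sublist (xs : List Int) : (PySem.Set.ofList xs).Sublist xs := by
  induction xs with
  | nil => simp [PySem.Set.ofList_nil]
  | cons x t ih =>
    rw [PySem.Set.ofList_cons]
    exact (List.cons_sublist_cons).2 (List.filter_sublist.trans ih)

-- discarding v from ofList (run ++ tail) where run is all v and v ∉ tail
lemma pvDiscard_ofList (v : Int) (run tail : List Int)
    (hr : ∀ x ∈ run, x = v) (ht : v ∉ tail) :
    (PySem.Set.ofList (run ++ tail)).discard v = PySem.Set.ofList tail := by
  induction run with
  | nil =>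
    simp only [List.nil_append]
    have : ∀ y ∈ PySem.Set.ofList tail, (!(y == v)) = true := by
      intro y hy
      have : y ≠ v := fun h => ht (h ▸ (PySem.Set.mem_ofList _ _).1 hy)
      simpa using this
    exact List.filter_eq_self.2 this
  | cons x r ih =>
    have hx : x = v := hr x (List.mem_cons_self)
    subst hx
    rw [List.cons_append, PySem.Set.ofList_cons]
    show List.filter _ (x :: _) = _
    rw [List.filter_cons_of_neg (by simp)]
    show ((PySem.Set.ofList (r ++ tail)).discard x).discard x = _
    rw [PySem.Set.discard, PySem.Set.discard, List.filter_filter]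
    have := ih (fun y hy => hr y (List.mem_cons_of_mem _ hy))
    rw [PySem.Set.discard] at this
    simpa using this

lemma pvDropWhile_eq_drop (p : Int → Bool) (l : List Int) :
    l.dropWhile p = l.drop (l.takeWhile p).length := by
  induction l with
  | nil => rfl
  | cons x t ih =>
    by_cases h : p x = true <;> simp [h, ih]

-- B's grouping of a descending list yields one entry per distinct value with its count
lemma pvGroup_eq (L : List Int) (h : L.Pairwise (fun a b => b ≤ a)) :
    pvGroup L = (PySem.Set.ofList L).map
      (fun k => [("th", k), ("count", ((L.count k : Int)))]) := by
  induction L using pvGroup.induct with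
  | case1 => simp [pvGroup, PySem.Set.ofList_nil]
  | case2 v rest run ih =>
    rcases List.pairwise_cons.1 h with ⟨hv, hrest⟩
    have hrun_mem : ∀ x ∈ run, x = v := by
      intro x hx
      have := List.takeWhile_subset (l := rest) (p := fun x => x == v) hx
      have hpred := List.mem_takeWhile_imp hx
      simpa using hpred
    have hsplit : rest = run ++ rest.drop run.length := by
      conv_lhs => rw [← List.takeWhile_append_dropWhile (p := fun x => x == v) (l := rest)]
      congr 1
      exact pvDropWhile_eq_drop _ _
    set tail := rest.drop run.length with htail
    have htail_sub : tail.Sublist rest := List.drop_sublist _ _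
    have htail_pw : tail.Pairwise (fun a b => b ≤ a) := hrest.sublist htail_sub
    have hvtail : v ∉ tail := by
      intro hmem
      have hd : tail = rest.dropWhile (fun x => x == v) := by
        rw [htail, pvDropWhile_eq_drop]
      rcases ht : tail with _ | ⟨hd0, tl0⟩
      · rw [ht] at hmem; simp at hmem
      · have hhd : ¬ ((hd0 == v) = true) := by
          have := List.head?_dropWhile_not (p := fun x => x == v) (l := rest)
          rw [← hd, ht] at this
          simpa using this
        have hhd' : hd0 ≠ v := by simpa using hhd
        rw [ht] at hmem
        rcases List.mem_cons.1 hmem with rfl | hmem2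
        · exact hhd' rfl
        · -- v after head: v ≤ hd0 < v contradiction
          have hpw2 : (hd0 :: tl0).Pairwise (fun a b => b ≤ a) := ht ▸ htail_pw
          have hle : v ≤ hd0 := (List.pairwise_cons.1 hpw2).1 v hmem2
          have hge : hd0 ≤ v := hv hd0 ((ht ▸ htail_sub).subset List.mem_cons_self)
          exact hhd' (le_antisymm hge hle)
    have hcount_v : (v :: rest).count v = run.length + 1 := by
      rw [List.count_cons_self]
      conv_lhs => rw [hsplit]
      rw [List.count_append]
      have h1 : run.count v = run.length := List.count_eq_length.2 (by
        intro x hx; exact ((hrun_mem x hx) ▸ rfl))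
      have h2 : tail.count v = 0 := List.count_eq_zero.2 hvtail
      omega
    have hcount_k : ∀ k ∈ PySem.Set.ofList tail, (v :: rest).count k = tail.count k := by
      intro k hk
      have hkt : k ∈ tail := (PySem.Set.mem_ofList _ _).1 hk
      have hkv : k ≠ v := fun h => hvtail (h ▸ hkt)
      conv_lhs => rw [hsplit]
      rw [List.count_cons, List.count_append]
      have h1 : run.count k = 0 := List.count_eq_zero.2 (fun hm => hkv (hrun_mem k hm))
      have h2 : (v == k) = false := by simpa using (Ne.symm hkv)
      rw [h1, h2]
      simp
    have hdisc : (PySem.Set.ofList rest).discard v = PySem.Set.ofList tail := by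
      conv_lhs => rw [hsplit]
      exact pvDiscard_ofList v run tail hrun_mem hvtail
    rw [pvGroup, ih htail_pw, PySem.Set.ofList_cons, hdisc, List.map_cons, hcount_v]
    refine congrArg₂ List.cons ?_ ?_
    · norm_cast
    · exact (List.map_congr_left (fun k hk => by rw [hcount_k k hk]))

-- main equivalence
lemma pvMain (profiles : List (List (String × Int))) :
    compute_th_distribution profiles = compute_th_distribution_alt profiles := by
  set vals := profiles.filterMap (fun p => (PySem.Dict.mk p).get? "th") with hvals
  set S := PySem.Set.ofList vals with hS
  set SL := PySem.List.sorted vals (fun x => x) true with hSL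
  -- B side
  have hSL_pw : SL.Pairwise (fun a b => b ≤ a) := PySem.List.sorted_pairwise_rev vals _
  have hB : compute_th_distribution_alt profiles
      = (PySem.Set.ofList SL).map (fun k => [("th", k), ("count", ((SL.count k : Int)))]) := by
    rw [compute_th_distribution_alt, ← hvals, ← hSL]
    exact pvGroup_eq SL hSL_pw
  -- D := ofList SL is a strictly decreasing enumeration of the distinct values
  set D := PySem.Set.ofList SL with hD
  have hD_sub : D.Sublist SL := pvOfList_sublist SL
  have hD_nodup : D.Nodup := PySem.Set.nodup_ofList SL
  have hD_ge : D.Pairwise (fun a b : Int => b ≤ a) := hSL_pw.sublist hD_sub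
  have hD_gt : D.Pairwise (fun a b : Int => b < a) := by
    have := hD_ge.and (List.Pairwise.imp (fun h => h) hD_nodup)
    exact this.imp (fun ⟨h1, h2⟩ => lt_of_le_of_ne h1 (fun h => h2 h.symm))
  have hD_perm : D.Perm S := by
    refine (List.perm_ext_iff_of_nodup hD_nodup (PySem.Set.nodup_ofList vals)).2 ?_
    intro a
    rw [PySem.Set.mem_ofList, PySem.Set.mem_ofList, PySem.List.mem_sorted]
  have hcount : ∀ k, SL.count k = vals.count k :=
    fun k => (PySem.List.sorted_perm vals (fun x => x) true).count_eq k
  -- A side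
  have hA : compute_th_distribution profiles
      = (PySem.List.sorted2 (S.map (fun k => (k, (vals.count k : Int)))) (fun p => p.1) (fun p => p.2) true).map
          (fun p => [("th", p.1), ("count", p.2)]) := by
    rw [compute_th_distribution]
    rw [pvFoldl_filterMap, ← hvals, PySem.Dict.foldl_insert_getD_add_one_eq_counter,
      PySem.Dict.items_counter, ← hS]
  have hsorted2 : PySem.List.sorted2 (S.map (fun k => (k, (vals.count k : Int)))) (fun p => p.1) (fun p => p.2) true
      = D.map (fun k => (k, (vals.count k : Int))) := by
    refine pvSorted2_rev_eq _ _ (hD_perm.map _) ?_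
    refine List.pairwise_map.2 (hD_gt.imp ?_)
    intro a b h; simpa using h
  rw [hA, hsorted2, hB, List.map_map]
  refine List.map_congr_left (fun k _ => ?_)
  simp [hcount k]

-- ===== VERDICT (by name: the statement is the Claim_ definition above) =====
theorem compute_th_distribution_spec : Claim_equal_compute_th_distribution := by
  intro profiles _
  exact pvMain profiles
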